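-- pv_equiv track=rewrite | github.com/franksunye/sales-reward-hub | scripts/turso_sql.py | _strip_leading_sql_comments
-- ===== SOURCE A (Python) =====
-- def _strip_leading_sql_comments(sql: str) -> str:
--     # Remove leading empty lines and SQL comments for keyword detection
--     text = sql.lstrip()
--     while True:
--         if text.startswith("--"):
--             newline_idx = text.find("\n")
--             if newline_idx == -1:
--                 return ""
--             text = text[newline_idx + 1 :].lstrip()
--             continue
--         if text.startswith("/*"):
--             end_idx = text.find("*/")
--             if end_idx == -1:
--                 return ""
--             text = text[end_idx + 2 :].lstrip()
--             continue
--         return text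
-- ===== SOURCE B (Python) =====
-- def _strip_leading_sql_comments(sql: str) -> str:
--     # Single index scan: advance i past whitespace and leading comments, slice once at the end.
--     n = len(sql)
--     i = 0
--     while i < n:
--         c = sql[i]
--         if c.isspace():
--             i += 1
--         elif c == "-" and i + 1 < n and sql[i + 1] == "-":
--             while i < n and sql[i] != "\n":
--                 i += 1
--             if i == n:
--                 return ""
--             i += 1
--         elif c == "/" and i + 1 < n and sql[i + 1] == "*":
--             i += 1
--             while i + 1 < n and not (sql[i] == "*" and sql[i + 1] == "/"):
--                 i += 1
--             if i + 1 >= n: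
--                 return ""
--             i += 2
--         else:
--             break
--     return sql[i:]
-- ===== Notes on version B (the rewrite author's own statement) =====
-- stated objective: faster
-- what changed: A repeatedly slices the string and re-lstrips after every stripped comment (copying the remainder each round); B advances a single index in one left-to-right scan, skipping whitespace and comment tokens in place, and slices the string exactly once at the end.
import Mathlib
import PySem

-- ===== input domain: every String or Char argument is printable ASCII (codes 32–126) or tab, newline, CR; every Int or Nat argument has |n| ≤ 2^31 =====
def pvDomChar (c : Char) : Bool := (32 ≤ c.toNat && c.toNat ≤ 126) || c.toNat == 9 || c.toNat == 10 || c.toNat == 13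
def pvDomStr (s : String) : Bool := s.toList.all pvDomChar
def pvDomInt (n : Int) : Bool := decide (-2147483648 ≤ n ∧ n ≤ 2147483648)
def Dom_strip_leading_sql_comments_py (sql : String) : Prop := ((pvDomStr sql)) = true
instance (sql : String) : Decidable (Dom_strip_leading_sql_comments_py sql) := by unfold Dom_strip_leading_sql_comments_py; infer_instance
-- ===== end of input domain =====

-- B replaces A's slice-and-restart loop (a fresh string copy per stripped comment) by a single
-- index scan that slices once at the end; return values agree on every input.

-- ===== PORT A =====
-- A's while-loop over the current text (Python slicing/lstrip on the List Char side).
def pvALoop (text : List Char) : List Char :=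
  if PySem.Chars.startswith text ['-', '-'] then
    let newlineIdx := PySem.Chars.find text ['\n']
    if h1 : newlineIdx = -1 then []
    else pvALoop (PySem.Chars.lstrip (PySem.List.slice text (some (newlineIdx + 1)) none))
  else if PySem.Chars.startswith text ['/', '*'] then
    let endIdx := PySem.Chars.find text ['*', '/']
    if h2 : endIdx = -1 then []
    else pvALoop (PySem.Chars.lstrip (PySem.List.slice text (some (endIdx + 2)) none))
  else text
termination_by text.length
decreasing_by
  · rename_i hpre
    have hge : -1 ≤ PySem.Chars.find text ['\n'] := PySem.Chars.neg_one_le_find text ['\n']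
    have hlen2 : 2 ≤ text.length := by
      simpa using List.IsPrefix.length_le ((PySem.Chars.startswith_iff _ _).mp hpre)
    rw [PySem.List.slice_from text (a := PySem.Chars.find text ['\n'] + 1) (by omega)]
    have hmono := List.length_dropWhile_le (p := PySem.Chars.isspace)
      (l := List.drop (PySem.Chars.find text ['\n'] + 1).toNat text)
    have h1' : (PySem.Chars.find text ['\n'] + 1).toNat ≥ 1 := by omega
    unfold PySem.Chars.lstrip
    simp only [List.length_drop] at *
    omega
  · rename_i _hno hpre
    have hge : -1 ≤ PySem.Chars.find text ['*', '/'] := PySem.Chars.neg_one_le_find text ['*', '/']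
    have hlen2 : 2 ≤ text.length := by
      simpa using List.IsPrefix.length_le ((PySem.Chars.startswith_iff _ _).mp hpre)
    rw [PySem.List.slice_from text (a := PySem.Chars.find text ['*', '/'] + 2) (by omega)]
    have hmono := List.length_dropWhile_le (p := PySem.Chars.isspace)
      (l := List.drop (PySem.Chars.find text ['*', '/'] + 2).toNat text)
    have h2' : (PySem.Chars.find text ['*', '/'] + 2).toNat ≥ 1 := by omega
    unfold PySem.Chars.lstrip
    simp only [List.length_drop] at *
    omega

def strip_leading_sql_comments_py (sql : String) : String :=
  String.ofList (pvALoop (PySem.Chars.lstrip sql.toList))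

-- ===== PORT B =====
-- B's inner `while sql[i] != '\n'` scan, phrased on the suffix starting at i.
def pvSkipLine : List Char → Option (List Char)
  | [] => none
  | c :: rest => if c = '\n' then some rest else pvSkipLine rest

-- B's inner `while not (sql[i] == '*' and sql[i+1] == '/')` scan.
def pvSkipBlock : List Char → Option (List Char)
  | [] => none
  | [_] => none
  | c :: d :: rest => if c = '*' ∧ d = '/' then some rest else pvSkipBlock (d :: rest)
termination_by cs => cs.length

theorem pvSkipLine_length {cs r : List Char} (h : pvSkipLine cs = some r) : r.length < cs.length := by
  induction cs with
  | nil => simp [pvSkipLine] at h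
  | cons c t ih =>
    rw [pvSkipLine] at h
    split at h
    · cases h; simp
    · exact Nat.lt_trans (ih h) (by simp)

theorem pvSkipBlock_length {cs r : List Char} (h : pvSkipBlock cs = some r) : r.length < cs.length := by
  induction cs with
  | nil => simp [pvSkipBlock] at h
  | cons c t ih =>
    match t, h with
    | [], h => simp [pvSkipBlock] at h
    | d :: rest, h =>
      rw [pvSkipBlock] at h
      split at h
      · cases h; simp
      · exact Nat.lt_trans (ih h) (by simp)

-- B's outer while-loop: one index scan, phrased on the suffix starting at the index.
def pvBLoop : List Char → List Char
  | [] => []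
  | c :: rest =>
    if PySem.Chars.isspace c then pvBLoop rest
    else if c = '-' ∧ rest.head? = some '-' then
      match _h : pvSkipLine (c :: rest) with
      | none => []
      | some r => pvBLoop r
    else if c = '/' ∧ rest.head? = some '*' then
      match _h : pvSkipBlock rest with
      | none => []
      | some r => pvBLoop r
    else c :: rest
termination_by cs => cs.length
decreasing_by
  · simp
  · exact pvSkipLine_length _h
  · exact Nat.lt_trans (pvSkipBlock_length _h) (by simp)

def strip_leading_sql_comments_py_alt (sql : String) : String :=
  String.ofList (pvBLoop sql.toList)

-- ===== PRECONDITION & SPEC =====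
def Spec_strip_leading_sql_comments_py (sql : String) (out : String) : Prop := out = strip_leading_sql_comments_py_alt sql
instance (sql : String) (out : String) : Decidable (Spec_strip_leading_sql_comments_py sql out) := by unfold Spec_strip_leading_sql_comments_py; infer_instance

-- ===== CLAIM (what is proved, stated in full; the proofs are below) =====
def Claim_equal_strip_leading_sql_comments_py : Prop := ∀ (sql : String), Dom_strip_leading_sql_comments_py sql → Spec_strip_leading_sql_comments_py sql (strip_leading_sql_comments_py sql)

-- ===== LEMMAS AND PROOFS =====

-- find.go unfolded one character.
theorem pvFindGo_cons (sub : List Char) (c : Char) (t : List Char) (k : Nat) :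
    PySem.Chars.find.go sub (c :: t) k =
      if sub.isPrefixOf (c :: t) then (k : Int) else PySem.Chars.find.go sub t (k + 1) := by
  rw [PySem.Chars.find.go]

-- find.go at offset k is find.go at offset 0, shifted (for a nonempty needle).
theorem pvFindGo_shift (sub : List Char) (hsub : sub ≠ []) :
    ∀ (s : List Char) (k : Nat), PySem.Chars.find.go sub s k =
      if PySem.Chars.find.go sub s 0 = -1 then -1 else PySem.Chars.find.go sub s 0 + k := by
  intro s
  induction s with
  | nil => intro k; simp [PySem.Chars.find.go, List.isEmpty_iff, hsub]
  | cons c t ih =>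
    intro k
    rw [pvFindGo_cons, pvFindGo_cons]
    by_cases hp : sub.isPrefixOf (c :: t) = true
    · simp [hp]
    · simp only [hp, Bool.false_eq_true, if_false]
      rw [ih (k + 1), ih 1]
      by_cases h0 : PySem.Chars.find.go sub t 0 = -1
      · simp [h0]
      · have hge : -1 ≤ PySem.Chars.find.go sub t 0 := PySem.Chars.neg_one_le_find t sub
        have hx : ¬ (PySem.Chars.find.go sub t 0 + 1 = -1) := by omega
        simp only [h0, if_false]
        omega

-- Python `find` unfolded one character (for a nonempty needle).
theorem pvFind_cons (sub : List Char) (hsub : sub ≠ []) (c : Char) (t : List Char) :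
    PySem.Chars.find (c :: t) sub =
      if sub.isPrefixOf (c :: t) then 0
      else if PySem.Chars.find t sub = -1 then -1 else PySem.Chars.find t sub + 1 := by
  show PySem.Chars.find.go sub (c :: t) 0 = _
  rw [pvFindGo_cons]
  by_cases hp : sub.isPrefixOf (c :: t) = true
  · simp [hp]
  · simp only [hp, Bool.false_eq_true, if_false]
    exact pvFindGo_shift sub hsub t 1

-- pvSkipLine computes exactly what A's `text.find("\n")` + slice computes.
theorem pvSkipLine_eq (cs : List Char) :
    pvSkipLine cs = if PySem.Chars.find cs ['\n'] = -1 then none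
      else some (cs.drop ((PySem.Chars.find cs ['\n']).toNat + 1)) := by
  induction cs with
  | nil =>
    have : PySem.Chars.find [] ['\n'] = -1 := by
      show PySem.Chars.find.go ['\n'] [] 0 = -1
      simp [PySem.Chars.find.go]
    simp [pvSkipLine, this]
  | cons c t ih =>
    rw [pvFind_cons ['\n'] (by simp) c t]
    by_cases hc : c = '\n'
    · subst hc
      simp [pvSkipLine, List.isPrefixOf]
    · have hp : (['\n'].isPrefixOf (c :: t)) = false := by
        simp [List.isPrefixOf]; exact fun h => absurd h.symm hc
      rw [pvSkipLine]
      simp only [hp, if_neg hc, Bool.false_eq_true, if_false]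
      rw [ih]
      by_cases h0 : PySem.Chars.find t ['\n'] = -1
      · simp [h0]
      · have hge : -1 ≤ PySem.Chars.find t ['\n'] := PySem.Chars.neg_one_le_find t ['\n']
        have hne : ¬ (PySem.Chars.find t ['\n'] + 1 = -1) := by omega
        simp only [h0, if_false, hne]
        have : (PySem.Chars.find t ['\n'] + 1).toNat = (PySem.Chars.find t ['\n']).toNat + 1 := by omega
        rw [this]
        simp [List.drop_succ_cons]

-- pvSkipBlock computes exactly what A's `text.find("*/")` + slice computes.
theorem pvSkipBlock_eq (cs : List Char) :
    pvSkipBlock cs = if PySem.Chars.find cs ['*', '/'] = -1 then none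
      else some (cs.drop ((PySem.Chars.find cs ['*', '/']).toNat + 2)) := by
  induction cs with
  | nil =>
    have : PySem.Chars.find [] ['*', '/'] = -1 := by
      show PySem.Chars.find.go ['*', '/'] [] 0 = -1
      simp [PySem.Chars.find.go]
    simp [pvSkipBlock, this]
  | cons c t ih =>
    rw [pvFind_cons ['*', '/'] (by simp) c t]
    match t, ih with
    | [], _ =>
      have h1 : PySem.Chars.find [] ['*', '/'] = -1 := by
        show PySem.Chars.find.go ['*', '/'] [] 0 = -1
        simp [PySem.Chars.find.go]
      have hp : (['*', '/'].isPrefixOf [c]) = false := by simp [List.isPrefixOf]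
      simp [pvSkipBlock, hp, h1]
    | d :: rest, ih =>
      by_cases hcd : c = '*' ∧ d = '/'
      · obtain ⟨hc, hd⟩ := hcd; subst hc; subst hd
        simp [pvSkipBlock, List.isPrefixOf]
      · have hp : (['*', '/'].isPrefixOf (c :: d :: rest)) = false := by
          simp [List.isPrefixOf]
          intro hc hd; exact hcd ⟨hc.symm, hd.symm⟩
        rw [pvSkipBlock]
        simp only [hp, Bool.false_eq_true, if_false, if_neg hcd]
        rw [ih]
        by_cases h0 : PySem.Chars.find (d :: rest) ['*', '/'] = -1
        · simp [h0]
        · have hge : -1 ≤ PySem.Chars.find (d :: rest) ['*', '/'] :=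
            PySem.Chars.neg_one_le_find (d :: rest) ['*', '/']
          have hne : ¬ (PySem.Chars.find (d :: rest) ['*', '/'] + 1 = -1) := by omega
          simp only [h0, if_false, hne]
          have : (PySem.Chars.find (d :: rest) ['*', '/'] + 1).toNat
              = (PySem.Chars.find (d :: rest) ['*', '/']).toNat + 1 := by omega
          rw [this]
          simp [List.drop_succ_cons]

-- A's loop on the lstripped text equals B's scan.
theorem pvMain : ∀ (n : Nat) (cs : List Char), cs.length ≤ n →
    pvALoop (PySem.Chars.lstrip cs) = pvBLoop cs := by
  intro n
  induction n with
  | zero =>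
    intro cs h
    have : cs = [] := List.eq_nil_of_length_eq_zero (Nat.le_zero.mp h)
    subst this
    rw [pvALoop, pvBLoop]
    simp [PySem.Chars.lstrip, PySem.Chars.startswith]
  | succ n ih =>
    intro cs hlen
    match cs with
    | [] =>
      rw [pvALoop, pvBLoop]
      simp [PySem.Chars.lstrip, PySem.Chars.startswith]
    | c :: t =>
      by_cases hsp : PySem.Chars.isspace c = true
      · have hl : PySem.Chars.lstrip (c :: t) = PySem.Chars.lstrip t := by
          simp [PySem.Chars.lstrip, List.dropWhile, hsp]
        rw [hl, pvBLoop, if_pos hsp]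
        exact ih t (by simpa using Nat.le_of_succ_le_succ hlen)
      · have hl : PySem.Chars.lstrip (c :: t) = c :: t := by
          simp [PySem.Chars.lstrip, List.dropWhile, hsp]
        rw [hl, pvALoop, pvBLoop, if_neg hsp]
        by_cases hb1 : c = '-' ∧ t.head? = some '-'
        · obtain ⟨hc, hd⟩ := hb1
          match t, hd with
          | d :: t2, hd =>
            have hd' : d = '-' := by simpa using hd
            subst hc; subst hd'
            have hsw : PySem.Chars.startswith ('-' :: '-' :: t2) ['-', '-'] = true := by
              simp [PySem.Chars.startswith, List.isPrefixOf]
            rw [if_pos hsw, if_pos (by simp : ('-' : Char) = '-' ∧ ('-' :: t2).head? = some '-')]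
            by_cases hnl : PySem.Chars.find ('-' :: '-' :: t2) ['\n'] = -1
            · rw [dif_pos hnl]
              have hsk : pvSkipLine ('-' :: '-' :: t2) = none := by
                rw [pvSkipLine_eq, if_pos hnl]
              split
              · rfl
              · rename_i r hr; rw [hsk] at hr; cases hr
            · rw [dif_neg hnl]
              have hge : -1 ≤ PySem.Chars.find ('-' :: '-' :: t2) ['\n'] :=
                PySem.Chars.neg_one_le_find _ _
              have hsk : pvSkipLine ('-' :: '-' :: t2)
                  = some (('-' :: '-' :: t2).drop ((PySem.Chars.find ('-' :: '-' :: t2) ['\n']).toNat + 1)) := by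
                rw [pvSkipLine_eq, if_neg hnl]
              split
              · rename_i hr; rw [hsk] at hr; cases hr
              · rename_i r hr
                rw [hsk] at hr
                injection hr with hr
                subst hr
                rw [PySem.List.slice_from _ (a := PySem.Chars.find ('-' :: '-' :: t2) ['\n'] + 1) (by omega)]
                have htn : (PySem.Chars.find ('-' :: '-' :: t2) ['\n'] + 1).toNat
                    = (PySem.Chars.find ('-' :: '-' :: t2) ['\n']).toNat + 1 := by omega
                rw [htn]
                apply ih
                simp only [List.length_drop, List.length_cons] at hlen ⊢
                omega
        · rw [if_neg hb1]
          have hsw1 : PySem.Chars.startswith (c :: t) ['-', '-'] = false := by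
            match t with
            | [] => simp [PySem.Chars.startswith, List.isPrefixOf]
            | d :: t2 =>
              simp only [PySem.Chars.startswith, List.isPrefixOf,
                Bool.and_true, Bool.and_eq_false_iff]
              by_cases hc : c = '-'
              · have hd : d ≠ '-' := fun hdd => hb1 ⟨hc, by simp [hdd]⟩
                exact Or.inr (beq_eq_false_iff_ne.mpr (Ne.symm hd))
              · exact Or.inl (beq_eq_false_iff_ne.mpr (Ne.symm hc))
          rw [if_neg (by simp [hsw1])]
          by_cases hb2 : c = '/' ∧ t.head? = some '*'
          · obtain ⟨hc, hd⟩ := hb2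
            match t, hd with
            | d :: t2, hd =>
              have hd' : d = '*' := by simpa using hd
              subst hc; subst hd'
              have hsw : PySem.Chars.startswith ('/' :: '*' :: t2) ['/', '*'] = true := by
                simp [PySem.Chars.startswith, List.isPrefixOf]
              rw [if_pos hsw, if_pos (by simp : ('/' : Char) = '/' ∧ ('*' :: t2).head? = some '*')]
              have hpfx : (['*', '/'].isPrefixOf ('/' :: '*' :: t2)) = false := by
                simp [List.isPrefixOf]
              have hfind : PySem.Chars.find ('/' :: '*' :: t2) ['*', '/']
                  = if PySem.Chars.find ('*' :: t2) ['*', '/'] = -1 then -1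
                    else PySem.Chars.find ('*' :: t2) ['*', '/'] + 1 := by
                rw [pvFind_cons ['*', '/'] (by simp) '/' ('*' :: t2)]
                simp [hpfx]
              by_cases he : PySem.Chars.find ('*' :: t2) ['*', '/'] = -1
              · have hv : PySem.Chars.find ('/' :: '*' :: t2) ['*', '/'] = -1 := by
                  rw [hfind]; simp [he]
                rw [dif_pos hv]
                have hsk : pvSkipBlock ('*' :: t2) = none := by
                  rw [pvSkipBlock_eq, if_pos he]
                split
                · rfl
                · rename_i r hr; rw [hsk] at hr; cases hr
              · have hge : -1 ≤ PySem.Chars.find ('*' :: t2) ['*', '/'] :=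
                  PySem.Chars.neg_one_le_find _ _
                have hv : PySem.Chars.find ('/' :: '*' :: t2) ['*', '/']
                    = PySem.Chars.find ('*' :: t2) ['*', '/'] + 1 := by rw [hfind]; simp [he]
                have hne : ¬ (PySem.Chars.find ('/' :: '*' :: t2) ['*', '/'] = -1) := by
                  rw [hv]; omega
                rw [dif_neg hne]
                have hsk : pvSkipBlock ('*' :: t2)
                    = some (('*' :: t2).drop ((PySem.Chars.find ('*' :: t2) ['*', '/']).toNat + 2)) := by
                  rw [pvSkipBlock_eq, if_neg he]
                split
                · rename_i hr; rw [hsk] at hr; cases hr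
                · rename_i r hr
                  rw [hsk] at hr
                  injection hr with hr
                  subst hr
                  rw [PySem.List.slice_from _ (a := PySem.Chars.find ('/' :: '*' :: t2) ['*', '/'] + 2) (by rw [hv]; omega)]
                  have htn : (PySem.Chars.find ('/' :: '*' :: t2) ['*', '/'] + 2).toNat
                      = ((PySem.Chars.find ('*' :: t2) ['*', '/']).toNat + 2) + 1 := by
                    rw [hv]; omega
                  rw [htn]
                  have hdrop : (('/' :: '*' :: t2).drop (((PySem.Chars.find ('*' :: t2) ['*', '/']).toNat + 2) + 1))
                      = ('*' :: t2).drop ((PySem.Chars.find ('*' :: t2) ['*', '/']).toNat + 2) := by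
                    simp [List.drop_succ_cons]
                  rw [hdrop]
                  apply ih
                  simp only [List.length_drop, List.length_cons] at hlen ⊢
                  omega
          · rw [if_neg hb2]
            have hsw2 : PySem.Chars.startswith (c :: t) ['/', '*'] = false := by
              match t with
              | [] => simp [PySem.Chars.startswith, List.isPrefixOf]
              | d :: t2 =>
                simp only [PySem.Chars.startswith, List.isPrefixOf,
                  Bool.and_true, Bool.and_eq_false_iff]
                by_cases hc : c = '/'
                · have hd : d ≠ '*' := fun hdd => hb2 ⟨hc, by simp [hdd]⟩
                  exact Or.inr (beq_eq_false_iff_ne.mpr (Ne.symm hd))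
                · exact Or.inl (beq_eq_false_iff_ne.mpr (Ne.symm hc))
            rw [if_neg (by simp [hsw2])]

-- ===== VERDICT (by name: the statement is the Claim_ definition above) =====
theorem strip_leading_sql_comments_py_spec : Claim_equal_strip_leading_sql_comments_py := by
  intro sql _
  show strip_leading_sql_comments_py sql = strip_leading_sql_comments_py_alt sql
  unfold strip_leading_sql_comments_py strip_leading_sql_comments_py_alt
  exact congrArg String.ofList (pvMain sql.toList.length sql.toList le_rfl)
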